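-- pv_equiv track=rewrite | github.com/AltheaGemino/Gemino-ITMGT | ipa-3.py | eta
-- ===== SOURCE A (Python) =====
-- def eta(first_stop, second_stop, route_map):
--     '''ETA.
--     25 points.
--
--     A shuttle van service is tasked to travel along a predefined circlar route.
--     This route is divided into several legs between stops.
--     The route is one-way only, and it is fully connected to itself.
--
--     This function returns how long it will take the shuttle to arrive at a stop
--     after leaving another stop.
--
--     Please see "mod-4-ipa-1-sample-data.py" for sample data. The route map will
--     adhere to the same pattern. The route map may contain more legs and more stops,
--     but it will always be one-way and fully enclosed.
--
--     Parameters
--     ----------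
--     first_stop: str
--         the stop that the shuttle will leave
--     second_stop: str
--         the stop that the shuttle will arrive at
--     route_map: dict
--         the data describing the routes
--
--     Returns
--     -------
--     int
--         the time it will take the shuttle to travel from first_stop to second_stop
--     '''
--     # Replace `pass` with your code.
--     # Stay within the function. Only use the parameters as input. The function should return your answer.
--     travelling = False
--     travel_time = 0
--
--     if first_stop == second_stop:
--         return 0
--
--     for route in route_map: #Iterate through possible routes
--         if route[0] == first_stop: # Determine if start of leg is first stop
--             travelling = True # Start the journey
--
--         if travelling == True: # If journey has started, add travel time of the leg to ETA
--             travel_time += route_map.get(route).get('travel_time_mins')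
--
--             if route[1] == second_stop: # If end of leg is second stop end the journey
--                 travelling = False
--                 break
--
--     # Edge case: If second stop is before first stop loop through routes again
--     if travelling == True:
--         for route in route_map:
--             travel_time += route_map.get(route).get('travel_time_mins')
--             if route[1] == second_stop:
--                 break
--
--     return travel_time
-- ===== SOURCE B (Python) =====
-- def eta(first_stop, second_stop, route_map):
--     if first_stop == second_stop:
--         return 0
--     keys = list(route_map)
--     n = len(keys)
--     i = next((t for t, leg in enumerate(keys) if leg[0] == first_stop), None)
--     if i is None:
--         return 0
--     prefix = [0]
--     for leg in keys + keys:
--         prefix.append(prefix[-1] + route_map[leg]['travel_time_mins'])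
--     j = next((t for t in range(i, 2 * n) if keys[t % n][1] == second_stop), 2 * n - 1)
--     return prefix[j + 1] - prefix[i]
-- ===== Notes on version B (the rewrite author's own statement) =====
-- stated objective: alternative
-- what changed: B replaces A's accumulate-and-break travelling loop plus separate wraparound loop with a prefix-sum table over the doubled leg list: it locates the start index i and the first end index j >= i by index search and returns the closed-form difference prefix[j+1] - prefix[i], with no running accumulator or break.
-- outside the precondition, e.g. on eta('a', 'b', {('a', 'b'): {'travel_time_mins': 5}, ('b', 'a'): {}}): A returns 5, B raises KeyError
import Mathlib
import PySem

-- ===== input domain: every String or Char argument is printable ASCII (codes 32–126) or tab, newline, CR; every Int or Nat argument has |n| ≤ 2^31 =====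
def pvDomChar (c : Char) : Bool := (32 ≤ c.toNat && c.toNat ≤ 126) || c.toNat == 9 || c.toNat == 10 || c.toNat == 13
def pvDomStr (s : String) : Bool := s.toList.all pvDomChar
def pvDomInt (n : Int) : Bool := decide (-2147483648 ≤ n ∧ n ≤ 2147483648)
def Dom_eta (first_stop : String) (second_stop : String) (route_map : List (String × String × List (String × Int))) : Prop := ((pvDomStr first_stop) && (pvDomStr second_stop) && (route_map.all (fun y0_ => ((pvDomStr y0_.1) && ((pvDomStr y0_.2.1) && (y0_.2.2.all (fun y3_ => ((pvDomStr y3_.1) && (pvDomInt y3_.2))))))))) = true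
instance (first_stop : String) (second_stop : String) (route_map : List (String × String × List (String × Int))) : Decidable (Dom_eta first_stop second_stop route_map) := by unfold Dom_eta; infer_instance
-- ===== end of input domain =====

-- B replaces A's accumulate-and-break loop pair with a prefix-sum table over the doubled
-- leg list and returns the closed-form difference prefix[j+1] - prefix[i] (objective: alternative).

-- ===== PORT A =====
-- route_map.get(route): the Python dict is keyed by the (stop, stop) tuple; hand-rolled
-- first-match lookup on the full pair (exact: Python dict lookup = first match in the assoc list).
def pvLegVal? (m : List (String × String × List (String × Int))) (k1 k2 : String) : Option (List (String × Int)) :=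
  match m with
  | [] => none
  | (a, b, v) :: rest => if a == k1 && b == k2 then some v else pvLegVal? rest k1 k2
-- .get('travel_time_mins') on the inner dict; none = the Python `None` that makes `+=` raise TypeError.
def pvTimeA? (m : List (String × String × List (String × Int))) (r : String × String × List (String × Int)) : Option Int :=
  match pvLegVal? m r.1 r.2.1 with
  | none => none
  | some d => PySem.Dict.get? (PySem.Dict.mk d) "travel_time_mins"

-- A's first loop: state (travelling, travel_time); some (trav, tt) = loop finished/broke, none = Python raised.
def etaLoop1 (fs ss : String) (m : List (String × String × List (String × Int))) :
    List (String × String × List (String × Int)) → Bool → Int → Option (Bool × Int)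
  | [], trav, tt => some (trav, tt)
  | r :: rest, trav, tt =>
    let trav' := if r.1 == fs then true else trav
    if trav' then
      match pvTimeA? m r with
      | none => none
      | some t =>
        if r.2.1 == ss then some (false, tt + t)   -- break
        else etaLoop1 fs ss m rest trav' (tt + t)
    else etaLoop1 fs ss m rest trav' tt

-- A's second (wraparound) loop.
def etaLoop2 (ss : String) (m : List (String × String × List (String × Int))) :
    List (String × String × List (String × Int)) → Int → Option Int
  | [], tt => some tt
  | r :: rest, tt =>
    match pvTimeA? m r with
    | none => none
    | some t => if r.2.1 == ss then some (tt + t) else etaLoop2 ss m rest (tt + t)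

def eta (first_stop : String) (second_stop : String) (route_map : List (String × String × List (String × Int))) : Int :=
  if first_stop == second_stop then 0
  else
    match etaLoop1 first_stop second_stop route_map route_map false 0 with
    | none => 0   -- Python raised here: excluded by Pre_eta
    | some (trav, tt) =>
      if trav then (etaLoop2 second_stop route_map route_map tt).getD 0 else tt

-- ===== PORT B =====
-- Source B: route_map[leg]['travel_time_mins'] (KeyError = none, excluded by Pre_eta).
def pvTimeB? (m : List (String × String × List (String × Int))) (r : String × String × List (String × Int)) : Option Int :=
  match pvLegVal? m r.1 r.2.1 with
  | none => none
  | some d => PySem.Dict.get? (PySem.Dict.mk d) "travel_time_mins"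

-- Source B's `next((t for t, leg in enumerate(keys) if leg[0] == first_stop), None)`.
def findStart (fs : String) : List (String × String × List (String × Int)) → Option Nat
  | [] => none
  | r :: rest => if r.1 == fs then some 0 else (findStart fs rest).map (· + 1)

-- Source B's prefix loop `for leg in keys + keys: prefix.append(prefix[-1] + ...)`:
-- returns the prefix list WITHOUT its leading 0; none = a lookup raised KeyError.
def buildPrefix (m : List (String × String × List (String × Int))) :
    List (String × String × List (String × Int)) → Int → Option (List Int)
  | [], _ => some []
  | r :: rest, last =>
    match pvTimeB? m r with
    | none => none
    | some t => (buildPrefix m rest (last + t)).map ((last + t) :: ·)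

-- Source B's `next((t for t in range(i, 2*n) if keys[t % n][1] == second_stop), ...)` over the range list.
def findEnd (ss : String) (keys : List (String × String × List (String × Int))) (n : Nat) : List Nat → Option Nat
  | [] => none
  | t :: ts =>
    if (match keys[t % n]? with | some r => r.2.1 == ss | none => false) then some t
    else findEnd ss keys n ts

def eta_alt (first_stop : String) (second_stop : String) (route_map : List (String × String × List (String × Int))) : Int :=
  if first_stop == second_stop then 0
  else
    match findStart first_stop route_map with
    | none => 0
    | some i =>
      let n := route_map.length
      match buildPrefix route_map (route_map ++ route_map) 0 with
      | none => 0   -- Python raised KeyError here: excluded by Pre_eta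
      | some pre =>
        let pref := (0 : Int) :: pre
        let j := (findEnd second_stop route_map n (List.range' i (2*n - i))).getD (2*n - 1)
        pref.getD (j+1) 0 - pref.getD i 0

-- ===== PRECONDITION & SPEC =====
-- Pre_eta excludes the inputs on which a leg record lacks 'travel_time_mins' and a journey starts
-- (A raises TypeError on a traversed key-less leg; B raises KeyError on ANY key-less leg once the
-- start is found, so B raises on some inputs where A still returns, e.g. a key-less leg after the
-- break): admitted are equal stops, no leg leaving first_stop, or every leg carrying the key.
def Pre_eta (first_stop : String) (second_stop : String) (route_map : List (String × String × List (String × Int))) : Prop :=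
  first_stop = second_stop ∨
  route_map.all (fun r => r.1 != first_stop) ∨
  route_map.all (fun r => r.2.2.any (fun p => p.1 == "travel_time_mins"))
instance (first_stop : String) (second_stop : String) (route_map : List (String × String × List (String × Int))) : Decidable (Pre_eta first_stop second_stop route_map) := by unfold Pre_eta; infer_instance
def pvWitness_eta : String × String × (List (String × String × List (String × Int))) :=
  ("a", "b", [("a", "b", [("travel_time_mins", 5)]), ("b", "a", [("travel_time_mins", 7)])])

def Spec_eta (first_stop : String) (second_stop : String) (route_map : List (String × String × List (String × Int))) (out : Int) : Prop := out = eta_alt first_stop second_stop route_map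
instance (first_stop : String) (second_stop : String) (route_map : List (String × String × List (String × Int))) (out : Int) : Decidable (Spec_eta first_stop second_stop route_map out) := by unfold Spec_eta; infer_instance

-- ===== CLAIM (what is proved, stated in full; the proofs are below) =====
def Claim_equal_eta : Prop := ∀ (first_stop : String) (second_stop : String) (route_map : List (String × String × List (String × Int))), Dom_eta first_stop second_stop route_map → Pre_eta first_stop second_stop route_map → Spec_eta first_stop second_stop route_map (eta first_stop second_stop route_map)

-- ===== LEMMAS AND PROOFS =====

-- Common skeleton of the travelling phase: add leg times, break at the first leg ending at ss;
-- some (false, t) = broke with total t, some (true, t) = ran off the end, none = lookup failed.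
def scanC (ss : String) (m : List (String × String × List (String × Int))) :
    List (String × String × List (String × Int)) → Int → Option (Bool × Int)
  | [], tt => some (true, tt)
  | r :: rest, tt =>
    match pvTimeA? m r with
    | none => none
    | some t => if r.2.1 == ss then some (false, tt + t) else scanC ss m rest (tt + t)

-- the (total) leg time used on the success path
def legTime (m : List (String × String × List (String × Int))) (r : String × String × List (String × Int)) : Int :=
  (pvTimeA? m r).getD 0

def sumT (m : List (String × String × List (String × Int))) (l : List (String × String × List (String × Int))) : Int :=
  (l.map (legTime m)).sum

theorem timeB_eq_timeA (m : List (String × String × List (String × Int)))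
    (r : String × String × List (String × Int)) : pvTimeB? m r = pvTimeA? m r := rfl

theorem loop1_true (fs ss : String) (m l : List (String × String × List (String × Int))) (tt : Int) :
    etaLoop1 fs ss m l true tt = scanC ss m l tt := by
  induction l generalizing tt with
  | nil => rfl
  | cons r rest ih =>
    simp only [etaLoop1, scanC]
    cases pvTimeA? m r with
    | none => simp
    | some t => by_cases h : (r.2.1 == ss) = true <;> simp [h, ih]

theorem loop1_start (fs ss : String) (m : List (String × String × List (String × Int)))
    (r : String × String × List (String × Int)) (post : List (String × String × List (String × Int)))
    (tt : Int) (h : (r.1 == fs) = true) :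
    etaLoop1 fs ss m (r :: post) false tt = scanC ss m (r :: post) tt := by
  simp only [etaLoop1, scanC, h]
  cases pvTimeA? m r with
  | none => simp
  | some t => by_cases h2 : (r.2.1 == ss) = true <;> simp [h2, loop1_true]

theorem loop1_skip (fs ss : String) (m pre l : List (String × String × List (String × Int))) (tt : Int)
    (h : ∀ x ∈ pre, (x.1 == fs) = false) :
    etaLoop1 fs ss m (pre ++ l) false tt = etaLoop1 fs ss m l false tt := by
  induction pre with
  | nil => rfl
  | cons r rest ih =>
    have hr := h r (List.mem_cons_self ..)
    simp only [List.cons_append, etaLoop1, hr]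
    simpa using ih (fun x hx => h x (List.mem_cons_of_mem _ hx))

theorem loop2_eq_scanC (ss : String) (m l : List (String × String × List (String × Int))) (tt : Int) :
    etaLoop2 ss m l tt = (scanC ss m l tt).map Prod.snd := by
  induction l generalizing tt with
  | nil => rfl
  | cons r rest ih =>
    simp only [etaLoop2, scanC]
    cases pvTimeA? m r with
    | none => simp
    | some t => by_cases h : (r.2.1 == ss) = true <;> simp [h, ih]

theorem scanC_append (ss : String) (m l1 l2 : List (String × String × List (String × Int))) (tt : Int) :
    scanC ss m (l1 ++ l2) tt =
      match scanC ss m l1 tt with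
      | none => none
      | some (false, t) => some (false, t)
      | some (true, t) => scanC ss m l2 t := by
  induction l1 generalizing tt with
  | nil => rfl
  | cons r rest ih =>
    simp only [List.cons_append, scanC]
    cases pvTimeA? m r with
    | none => simp
    | some t => by_cases h : (r.2.1 == ss) = true <;> simp [h, ih]

theorem findStart_none (fs : String) (l : List (String × String × List (String × Int))) :
    findStart fs l = none → ∀ x ∈ l, (x.1 == fs) = false := by
  induction l with
  | nil => intro _ x hx; cases hx
  | cons r rest ih =>
    intro h x hx
    simp only [findStart] at h
    by_cases hr : (r.1 == fs) = true
    · simp [hr] at h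
    · have hrest : findStart fs rest = none := by
        cases hfr : findStart fs rest with
        | none => rfl
        | some k => rw [if_neg (by simp [hr]), hfr] at h; simp at h
      rcases List.mem_cons.mp hx with hx | hx
      · subst hx; simpa using hr
      · exact ih hrest x hx

theorem findStart_some (fs : String) (l : List (String × String × List (String × Int))) (k : Nat) :
    findStart fs l = some k →
    k ≤ l.length ∧ (∀ x ∈ l.take k, (x.1 == fs) = false) ∧
      ∃ r post, l.drop k = r :: post ∧ (r.1 == fs) = true := by
  induction l generalizing k with
  | nil => intro h; cases h
  | cons r rest ih =>
    intro h
    simp only [findStart] at h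
    by_cases hr : (r.1 == fs) = true
    · rw [if_pos hr] at h
      injection h with h; subst h
      exact ⟨Nat.zero_le _, by intro x hx; simp at hx, r, rest, rfl, hr⟩
    · rw [if_neg (by simp [hr])] at h
      cases hfr : findStart fs rest with
      | none => rw [hfr] at h; simp at h
      | some k' =>
        rw [hfr] at h
        simp only [Option.map_some] at h
        injection h with h; subst h
        obtain ⟨hle, htake, r', post, hdrop, hr'⟩ := ih k' hfr
        refine ⟨Nat.succ_le_succ hle, ?_, r', post, by simpa using hdrop, hr'⟩
        intro x hx
        simp only [List.take_succ_cons] at hx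
        rcases List.mem_cons.mp hx with hx | hx
        · subst hx; simpa using hr
        · exact htake x hx

-- A's value expressed through scanC on the doubled list (unconditional).
theorem eta_char (fs ss : String) (m : List (String × String × List (String × Int)))
    (hss : (fs == ss) = false) (k : Nat) (hf : findStart fs m = some k) :
    eta fs ss m = ((scanC ss m ((m ++ m).drop k) 0).map Prod.snd).getD 0 := by
  obtain ⟨hle, htake, r, post, hdrop, hr⟩ := findStart_some fs m k hf
  have hL1 : etaLoop1 fs ss m m false 0 = scanC ss m (m.drop k) 0 := by
    calc etaLoop1 fs ss m m false 0
        = etaLoop1 fs ss m (m.take k ++ m.drop k) false 0 := by rw [List.take_append_drop]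
      _ = etaLoop1 fs ss m (m.drop k) false 0 := loop1_skip fs ss m _ _ 0 htake
      _ = scanC ss m (m.drop k) 0 := by rw [hdrop]; exact loop1_start fs ss m r post 0 hr
  have hdd : (m ++ m).drop k = m.drop k ++ m := List.drop_append_of_le_length hle
  simp only [eta, hss, Bool.false_eq_true, if_false, hL1, hdd, scanC_append]
  cases hsc : scanC ss m (m.drop k) 0 with
  | none => simp
  | some p =>
    obtain ⟨b, t⟩ := p
    cases b with
    | false => simp
    | true => simp [loop2_eq_scanC]

-- lookup totality under the all-legs-carry-the-key precondition
theorem legVal_isSome (m : List (String × String × List (String × Int)))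
    (r : String × String × List (String × Int)) (hr : r ∈ m) :
    (pvLegVal? m r.1 r.2.1).isSome := by
  induction m with
  | nil => cases hr
  | cons x rest ih =>
    obtain ⟨a, b, v⟩ := x
    simp only [pvLegVal?]
    by_cases h : (a == r.1 && b == r.2.1) = true
    · simp [h]
    · rw [if_neg h]
      rcases List.mem_cons.mp hr with hx | hx
      · exfalso; subst hx; simp at h
      · exact ih hx

theorem legVal_mem (m : List (String × String × List (String × Int))) (a b : String)
    (d : List (String × Int)) (h : pvLegVal? m a b = some d) : ∃ r ∈ m, r.2.2 = d := by
  induction m with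
  | nil => cases h
  | cons x rest ih =>
    obtain ⟨a', b', v⟩ := x
    simp only [pvLegVal?] at h
    by_cases hx : (a' == a && b' == b) = true
    · rw [if_pos hx] at h; injection h with h; subst h
      exact ⟨(a', b', v), List.mem_cons_self .., rfl⟩
    · rw [if_neg hx] at h
      obtain ⟨r, hr, hd⟩ := ih h
      exact ⟨r, List.mem_cons_of_mem _ hr, hd⟩

theorem dictGet_isSome (d : List (String × Int))
    (h : (d.any (fun p => p.1 == "travel_time_mins")) = true) :
    (PySem.Dict.get? (PySem.Dict.mk d) "travel_time_mins").isSome := by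
  induction d with
  | nil => simp at h
  | cons p rest ih =>
    rw [PySem.Dict.get?_mk_cons]
    by_cases hp : (p.1 == "travel_time_mins") = true
    · simp [hp]
    · simp only [List.any_cons, hp, Bool.false_or] at h
      simp [hp, ih h]

theorem timeA_some (m : List (String × String × List (String × Int)))
    (hkeys : (m.all (fun r => r.2.2.any (fun p => p.1 == "travel_time_mins"))) = true)
    (r : String × String × List (String × Int)) (hr : r ∈ m) :
    pvTimeA? m r = some (legTime m r) := by
  have h1 := legVal_isSome m r hr
  cases hv : pvLegVal? m r.1 r.2.1 with
  | none => rw [hv] at h1; simp at h1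
  | some d =>
    obtain ⟨r', hr', hd⟩ := legVal_mem m r.1 r.2.1 d hv
    have hk : (d.any (fun p => p.1 == "travel_time_mins")) = true := by
      rw [← hd]; exact (List.all_eq_true.mp hkeys) r' hr'
    have h2 := dictGet_isSome d hk
    cases hg : PySem.Dict.get? (PySem.Dict.mk d) "travel_time_mins" with
    | none => rw [hg] at h2; simp at h2
    | some t => simp [pvTimeA?, legTime, hv, hg]

-- scanC on a list with total lookups, characterized by findIdx?
theorem scanC_ok (ss : String) (m l : List (String × String × List (String × Int))) (tt : Int)
    (h : ∀ r ∈ l, pvTimeA? m r = some (legTime m r)) :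
    scanC ss m l tt =
      match l.findIdx? (fun r => r.2.1 == ss) with
      | none => some (true, tt + sumT m l)
      | some q => some (false, tt + sumT m (l.take (q+1))) := by
  induction l generalizing tt with
  | nil => simp [scanC, sumT]
  | cons r rest ih =>
    have hr := h r (List.mem_cons_self ..)
    simp only [scanC, hr, List.findIdx?_cons]
    by_cases he : (r.2.1 == ss) = true
    · simp [he, sumT]
    · simp only [he, Bool.false_eq_true, if_false]
      rw [ih _ (fun x hx => h x (List.mem_cons_of_mem _ hx))]
      cases hq : rest.findIdx? (fun r => r.2.1 == ss) with
      | none => simp [sumT, add_assoc]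
      | some q => simp [sumT, add_assoc]

theorem findIdx?_lt {α : Type} (p : α → Bool) (l : List α) (q : Nat)
    (h : l.findIdx? p = some q) : q < l.length := by
  induction l generalizing q with
  | nil => cases h
  | cons x rest ih =>
    rw [List.findIdx?_cons] at h
    by_cases hx : p x = true
    · rw [if_pos hx] at h; injection h with h; simp only [List.length_cons]; omega
    · rw [if_neg hx] at h
      cases hq : rest.findIdx? p with
      | none => rw [hq] at h; cases h
      | some q' =>
        rw [hq] at h; simp only [Option.map_some] at h
        injection h with h; subst h
        exact Nat.succ_lt_succ (ih q' hq)

-- buildPrefix computes cumulative sums when every lookup succeeds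
def cumul (m : List (String × String × List (String × Int))) :
    List (String × String × List (String × Int)) → Int → List Int
  | [], _ => []
  | r :: rest, last => (last + legTime m r) :: cumul m rest (last + legTime m r)

theorem buildPrefix_ok (m l : List (String × String × List (String × Int))) (last : Int)
    (h : ∀ r ∈ l, pvTimeA? m r = some (legTime m r)) :
    buildPrefix m l last = some (cumul m l last) := by
  induction l generalizing last with
  | nil => rfl
  | cons r rest ih =>
    have hr := h r (List.mem_cons_self ..)
    simp only [buildPrefix, timeB_eq_timeA, hr, cumul]
    rw [ih _ (fun x hx => h x (List.mem_cons_of_mem _ hx))]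
    rfl

theorem cumul_getD (m : List (String × String × List (String × Int)))
    (l : List (String × String × List (String × Int))) (last : Int) (t : Nat) (ht : t ≤ l.length) :
    (last :: cumul m l last).getD t 0 = last + sumT m (l.take t) := by
  induction l generalizing last t with
  | nil =>
    have ht0 : t = 0 := Nat.le_zero.mp ht
    subst ht0
    simp [sumT]
  | cons r rest ih =>
    cases t with
    | zero => simp [sumT]
    | succ t' =>
      simp only [List.length_cons, Nat.succ_le_succ_iff] at ht
      simp only [cumul, List.getD_cons_succ, List.take_succ_cons]
      rw [ih _ _ ht]
      simp [sumT, add_assoc]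

-- (m ++ m)[t]? = m[t % n]? for t < 2n
theorem doubled_get (m : List (String × String × List (String × Int))) (t : Nat)
    (ht : t < 2 * m.length) : (m ++ m)[t]? = m[t % m.length]? := by
  by_cases h : t < m.length
  · rw [List.getElem?_append_left h, Nat.mod_eq_of_lt h]
  · have h1 : m.length ≤ t := Nat.le_of_not_lt h
    have h2 : t - m.length < m.length := by omega
    have h3 : t % m.length = t - m.length := by
      rw [Nat.mod_eq_sub_mod h1, Nat.mod_eq_of_lt h2]
    rw [List.getElem?_append_right h1, h3]

theorem findEnd_char (ss : String) (m : List (String × String × List (String × Int)))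
    (c i : Nat) (hc : i + c = 2 * m.length) :
    findEnd ss m m.length (List.range' i c) =
      (((m ++ m).drop i).findIdx? (fun r => r.2.1 == ss)).map (i + ·) := by
  induction c generalizing i with
  | zero =>
    have : (m ++ m).drop i = [] := by
      apply List.drop_eq_nil_of_le; simp; omega
    simp [List.range', findEnd, this]
  | succ c' ih =>
    have hi : i < 2 * m.length := by omega
    have hi' : i < (m ++ m).length := by simp; omega
    have hget : (m ++ m)[i]? = m[i % m.length]? := doubled_get m i hi
    have hr : (m ++ m)[i]? = some ((m ++ m)[i]'hi') := List.getElem?_eq_getElem hi'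
    have hdrop : (m ++ m).drop i = ((m ++ m)[i]'hi') :: (m ++ m).drop (i + 1) :=
      List.drop_eq_getElem_cons hi'
    rw [List.range'_succ]
    simp only [findEnd, hget.symm, hr, hdrop, List.findIdx?_cons]
    by_cases he : (((m ++ m)[i]'hi').2.1 == ss) = true
    · simp [he]
    · simp only [he, Bool.false_eq_true, if_false]
      rw [ih (i + 1) (by omega)]
      cases hq : ((m ++ m).drop (i + 1)).findIdx? (fun r => r.2.1 == ss) with
      | none => simp
      | some q => simp; omega

theorem sumT_append (m : List (String × String × List (String × Int)))
    (l1 l2 : List (String × String × List (String × Int))) :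
    sumT m (l1 ++ l2) = sumT m l1 + sumT m l2 := by
  simp [sumT]

-- B's value expressed through scanC, under the key precondition
theorem eta_alt_char (fs ss : String) (m : List (String × String × List (String × Int)))
    (hss : (fs == ss) = false) (i : Nat) (hf : findStart fs m = some i)
    (hkeys : (m.all (fun r => r.2.2.any (fun p => p.1 == "travel_time_mins"))) = true) :
    eta_alt fs ss m = ((scanC ss m ((m ++ m).drop i) 0).map Prod.snd).getD 0 := by
  have htot : ∀ r ∈ m ++ m, pvTimeA? m r = some (legTime m r) := by
    intro r hr
    exact timeA_some m hkeys r (by rcases List.mem_append.mp hr with h | h <;> exact h)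
  have htotd : ∀ r ∈ (m ++ m).drop i, pvTimeA? m r = some (legTime m r) :=
    fun r hr => htot r (List.mem_of_mem_drop hr)
  obtain ⟨hle, -, r0, post, hdrop0, -⟩ := findStart_some fs m i hf
  have hn : 0 < m.length := by
    by_contra h
    have : m = [] := List.eq_nil_of_length_eq_zero (by omega)
    subst this; simp at hdrop0
  have hi : i < m.length := by
    have := congrArg List.length hdrop0
    simp at this; omega
  have hlen2 : (m ++ m).length = 2 * m.length := by simp; omega
  simp only [eta_alt, hss, Bool.false_eq_true, if_false, hf,
    buildPrefix_ok m (m ++ m) 0 htot]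
  rw [findEnd_char ss m (2 * m.length - i) i (by omega)]
  rw [scanC_ok ss m _ 0 htotd]
  cases hq : ((m ++ m).drop i).findIdx? (fun r => r.2.1 == ss) with
  | none =>
    simp only [Option.map_none, Option.getD_none, Option.getD_some, Option.map_some]
    rw [show 2 * m.length - 1 + 1 = 2 * m.length from by omega]
    rw [cumul_getD m _ 0 (2 * m.length) (by simp; omega), cumul_getD m _ 0 i (by simp; omega)]
    have htk : (m ++ m).take (2 * m.length) = m ++ m := List.take_of_length_le (by simp; omega)
    rw [htk]
    have hsum : sumT m (m ++ m) = sumT m ((m ++ m).take i) + sumT m ((m ++ m).drop i) := by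
      rw [← sumT_append, List.take_append_drop]
    rw [hsum]
    ring
  | some q =>
    have hqlt : q < ((m ++ m).drop i).length := findIdx?_lt _ _ q hq
    have hqlt' : i + q + 1 ≤ 2 * m.length := by simp at hqlt; omega
    simp only [Option.map_some, Option.getD_some]
    rw [cumul_getD m _ 0 (i + q + 1) (by simp; omega), cumul_getD m _ 0 i (by simp; omega)]
    have hta : (m ++ m).take (i + (q + 1)) = (m ++ m).take i ++ ((m ++ m).drop i).take (q + 1) :=
      List.take_add ..
    rw [show i + q + 1 = i + (q + 1) from by omega, hta, sumT_append]
    ring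

-- ===== VERDICT (by name: the statement is the Claim_ definition above) =====
theorem eta_spec : Claim_equal_eta := by
  intro fs ss m _ hpre
  unfold Spec_eta
  by_cases hss : (fs == ss) = true
  · simp [eta, eta_alt, hss]
  · have hss' : (fs == ss) = false := by simpa using hss
    cases hf : findStart fs m with
    | none =>
      have hnone : ∀ x ∈ m, (x.1 == fs) = false := findStart_none fs m hf
      have h1 : etaLoop1 fs ss m m false 0 = some (false, 0) := by
        simpa using loop1_skip fs ss m m [] 0 hnone
      simp [eta, eta_alt, hss', h1, hf]
    | some i =>
      rcases hpre with h | h | h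
      · exfalso; rw [h] at hss'; simp at hss'
      · exfalso
        obtain ⟨-, -, r0, post, hd, hr0⟩ := findStart_some fs m i hf
        have hmem : r0 ∈ m := by
          have : r0 ∈ m.drop i := by rw [hd]; exact List.mem_cons_self ..
          exact List.mem_of_mem_drop this
        have heq : r0.1 = fs := by simpa using hr0
        have h2 := (List.all_eq_true.mp h) r0 hmem
        simp [heq] at h2
      · rw [eta_char fs ss m hss' i hf, eta_alt_char fs ss m hss' i hf h]
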